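-- pv_equiv track=rewrite | github.com/srikar0805/studentsafety-companion | scripts/etl/load_campus_locations.py | categorize_building
-- ===== SOURCE A (Python) =====
-- CATEGORY_RULES = {
--     "dorm": [
--         "hall", "residence", "housing", "dormitory",
--         # Specific Mizzou dorms
--         "hatch", "mark twain", "college avenue", "gateway", "lathrop",
--         "laws", "johnston", "schurz", "gillett", "hudson", "jones", "defoe"
--     ],
--     "library": [
--         "library", "libraries"
--     ],
--     "dining": [
--         "dining", "cafeteria", "food", "plaza", "commons", "grill"
--     ],
--     "academic": [
--         "building", "hall", "center", "laboratory", "lab", "classroom",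
--         "engineering", "science", "education", "arts", "school", "department"
--     ],
--     "recreation": [
--         "rec", "recreation", "gym", "fitness", "stadium", "arena", "pool",
--         "wellness", "field house", "athletic"
--     ],
--     "parking": [
--         "parking", "garage", "lot"
--     ]
-- }
--
-- def categorize_building(name: str) -> str:
--     """
--     Categorize a building based on its name.
--
--     Args:
--         name: Building name
--
--     Returns:
--         Category string (one of: dorm, library, dining, academic, recreation, parking, misc)
--     """
--     name_lower = name.lower()
--
--     # Check each category's keywords
--     for category, keywords in CATEGORY_RULES.items():
--         for keyword in keywords:
--             if keyword in name_lower: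
--                 # Special handling to avoid academic buildings being categorized as dorms
--                 if category == "dorm":
--                     # Only categorize as dorm if it's actually residential
--                     dorm_specific = ["residence", "housing", "dormitory", "hatch", "mark twain",
--                                    "college avenue", "gateway", "lathrop", "laws", "johnston"]
--                     if any(kw in name_lower for kw in dorm_specific):
--                         return "dorm"
--                     # If just "hall" but not in dorm list, check if it's academic
--                     if keyword == "hall" and any(acad in name_lower for acad in ["academic", "classroom", "lecture"]):
--                         continue
--                     # Known dorm halls
--                     if keyword == "hall" and name_lower.endswith("hall"):
--                         return "dorm"
--                 else:
--                     return category
--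
--     return "misc"
-- ===== SOURCE B (Python) =====
-- # B: one pass builds the SET of matched tags from a flat keyword->tag table,
-- # then a fixed decision over that set replaces A's nested scan-with-continues.
-- KEYWORD_TAGS = [
--     # tag "dorm": the dorm-specific keywords
--     ("residence", "dorm"), ("housing", "dorm"), ("dormitory", "dorm"),
--     ("hatch", "dorm"), ("mark twain", "dorm"), ("college avenue", "dorm"),
--     ("gateway", "dorm"), ("lathrop", "dorm"), ("laws", "dorm"), ("johnston", "dorm"),
--     # tag "acadmark": markers that veto the "...hall" dorm rule
--     ("academic", "acadmark"), ("classroom", "acadmark"), ("lecture", "acadmark"),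
--     # plain categories
--     ("library", "library"), ("libraries", "library"),
--     ("dining", "dining"), ("cafeteria", "dining"), ("food", "dining"),
--     ("plaza", "dining"), ("commons", "dining"), ("grill", "dining"),
--     ("building", "academic"), ("hall", "academic"), ("center", "academic"),
--     ("laboratory", "academic"), ("lab", "academic"), ("classroom", "academic"),
--     ("engineering", "academic"), ("science", "academic"), ("education", "academic"),
--     ("arts", "academic"), ("school", "academic"), ("department", "academic"),
--     ("rec", "recreation"), ("recreation", "recreation"), ("gym", "recreation"),
--     ("fitness", "recreation"), ("stadium", "recreation"), ("arena", "recreation"),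
--     ("pool", "recreation"), ("wellness", "recreation"), ("field house", "recreation"),
--     ("athletic", "recreation"),
--     ("parking", "parking"), ("garage", "parking"), ("lot", "parking"),
-- ]
--
-- PRIORITY = ["library", "dining", "academic", "recreation", "parking"]
--
--
-- def categorize_building(name: str) -> str:
--     nl = name.lower()
--     matched = {tag for kw, tag in KEYWORD_TAGS if kw in nl}
--     if "dorm" in matched:
--         return "dorm"
--     if nl.endswith("hall") and "acadmark" not in matched:
--         return "dorm"
--     for cat in PRIORITY:
--         if cat in matched:
--             return cat
--     return "misc"
-- ===== Notes on version B (the rewrite author's own statement) =====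
-- stated objective: alternative
-- what changed: B builds, in one pass over a flat keyword-to-tag table, the set of matched tags (dorm-specific, academic-marker, and the five plain categories), then makes the decision purely from that set (dorm-specific tag, else the 'ends with hall' rule vetoed by the academic-marker tag, else the first priority category in the set), replacing A's nested category/keyword loops with embedded continues and special cases.
import Mathlib
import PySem

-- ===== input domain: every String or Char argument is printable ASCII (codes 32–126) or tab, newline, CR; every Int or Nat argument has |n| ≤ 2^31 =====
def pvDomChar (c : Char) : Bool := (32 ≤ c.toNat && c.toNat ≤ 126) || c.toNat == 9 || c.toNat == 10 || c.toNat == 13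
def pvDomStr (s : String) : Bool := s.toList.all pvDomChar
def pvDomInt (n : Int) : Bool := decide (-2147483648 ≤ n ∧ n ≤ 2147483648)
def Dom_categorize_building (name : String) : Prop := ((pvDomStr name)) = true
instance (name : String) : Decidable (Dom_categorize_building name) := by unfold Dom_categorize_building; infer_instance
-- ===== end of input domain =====

-- B replaces A's nested keyword loops (with dorm special-casing via continues) by one pass
-- building the set of matched tags from a flat keyword→tag table, then a fixed decision over
-- that set: objective = alternative (same cost, different structure).

-- ===== PORT A =====
def pvDormKws : List String :=
  ["hall", "residence", "housing", "dormitory",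
   "hatch", "mark twain", "college avenue", "gateway", "lathrop",
   "laws", "johnston", "schurz", "gillett", "hudson", "jones", "defoe"]

def pvCategoryRules : List (String × List String) :=
  [("dorm", pvDormKws),
   ("library", ["library", "libraries"]),
   ("dining", ["dining", "cafeteria", "food", "plaza", "commons", "grill"]),
   ("academic", ["building", "hall", "center", "laboratory", "lab", "classroom",
                 "engineering", "science", "education", "arts", "school", "department"]),
   ("recreation", ["rec", "recreation", "gym", "fitness", "stadium", "arena", "pool",
                   "wellness", "field house", "athletic"]),
   ("parking", ["parking", "garage", "lot"])]

def pvDormSpecific : List String :=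
  ["residence", "housing", "dormitory", "hatch", "mark twain",
   "college avenue", "gateway", "lathrop", "laws", "johnston"]

-- the inner 'for keyword in keywords' loop of A (returns some r on 'return r', none on fall-through)
def pvInnerA (nl : String) (category : String) : List String → Option String
  | [] => none
  | kw :: rest =>
    if PySem.Str.isIn kw nl then
      if category == "dorm" then
        if pvDormSpecific.any (fun k => PySem.Str.isIn k nl) then some "dorm"
        else if kw == "hall" && (["academic", "classroom", "lecture"] : List String).any
                 (fun a => PySem.Str.isIn a nl) then
          pvInnerA nl category rest
        else if kw == "hall" && PySem.Str.endswith nl "hall" then some "dorm"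
        else pvInnerA nl category rest
      else some category
    else pvInnerA nl category rest

-- the outer 'for category, keywords in CATEGORY_RULES.items()' loop of A
def pvOuterA (nl : String) : List (String × List String) → Option String
  | [] => none
  | (cat, kws) :: rest =>
    match pvInnerA nl cat kws with
    | some r => some r
    | none => pvOuterA nl rest

def categorize_building (name : String) : String :=
  let name_lower := PySem.Str.lower name
  (pvOuterA name_lower pvCategoryRules).getD "misc"

-- ===== PORT B =====
def pvKeywordTags : List (String × String) :=
  [("residence", "dorm"), ("housing", "dorm"), ("dormitory", "dorm"),
   ("hatch", "dorm"), ("mark twain", "dorm"), ("college avenue", "dorm"),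
   ("gateway", "dorm"), ("lathrop", "dorm"), ("laws", "dorm"), ("johnston", "dorm"),
   ("academic", "acadmark"), ("classroom", "acadmark"), ("lecture", "acadmark"),
   ("library", "library"), ("libraries", "library"),
   ("dining", "dining"), ("cafeteria", "dining"), ("food", "dining"),
   ("plaza", "dining"), ("commons", "dining"), ("grill", "dining"),
   ("building", "academic"), ("hall", "academic"), ("center", "academic"),
   ("laboratory", "academic"), ("lab", "academic"), ("classroom", "academic"),
   ("engineering", "academic"), ("science", "academic"), ("education", "academic"),
   ("arts", "academic"), ("school", "academic"), ("department", "academic"),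
   ("rec", "recreation"), ("recreation", "recreation"), ("gym", "recreation"),
   ("fitness", "recreation"), ("stadium", "recreation"), ("arena", "recreation"),
   ("pool", "recreation"), ("wellness", "recreation"), ("field house", "recreation"),
   ("athletic", "recreation"),
   ("parking", "parking"), ("garage", "parking"), ("lot", "parking")]

def pvPriorityB : List String := ["library", "dining", "academic", "recreation", "parking"]

-- the set comprehension {tag for kw, tag in KEYWORD_TAGS if kw in nl}
def pvMatchedB (nl : String) : PySem.Set String :=
  PySem.Set.ofList ((pvKeywordTags.filter (fun p => PySem.Str.isIn p.1 nl)).map Prod.snd)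

-- the 'for cat in PRIORITY' loop of B
def pvPickB (matched : PySem.Set String) : List String → String
  | [] => "misc"
  | c :: rest => if PySem.Set.contains matched c then c else pvPickB matched rest

def categorize_building_alt (name : String) : String :=
  let nl := PySem.Str.lower name
  let matched := pvMatchedB nl
  if PySem.Set.contains matched "dorm" then "dorm"
  else if PySem.Str.endswith nl "hall" && !(PySem.Set.contains matched "acadmark") then "dorm"
  else pvPickB matched pvPriorityB

-- ===== PRECONDITION & SPEC =====
def Spec_categorize_building (name : String) (out : String) : Prop := out = categorize_building_alt name
instance (name : String) (out : String) : Decidable (Spec_categorize_building name out) := by unfold Spec_categorize_building; infer_instance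

-- ===== CLAIM (what is proved, stated in full; the proofs are below) =====
def Claim_equal_categorize_building : Prop := ∀ (name : String), Dom_categorize_building name → Spec_categorize_building name (categorize_building name)

-- ===== LEMMAS AND PROOFS =====

-- membership of a tag in B's matched set = an any-scan over the flat table
lemma pv_contains_matched (nl t : String) :
    PySem.Set.contains (pvMatchedB nl) t =
      pvKeywordTags.any (fun p => PySem.Str.isIn p.1 nl && p.2 == t) := by
  rw [Bool.eq_iff_iff]
  simp only [pvMatchedB, PySem.Set.contains_iff, PySem.Set.mem_ofList, List.mem_map,
    List.mem_filter, List.any_eq_true, Bool.and_eq_true, beq_iff_eq]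
  constructor
  · rintro ⟨p, ⟨hp, hin⟩, rfl⟩; exact ⟨p, hp, hin, rfl⟩
  · rintro ⟨p, hp, hin, rfl⟩; exact ⟨p, ⟨hp, hin⟩, rfl⟩

-- the tag "dorm" is matched exactly when a dorm-specific keyword occurs
lemma pv_tag_dorm (nl : String) :
    PySem.Set.contains (pvMatchedB nl) "dorm" =
      pvDormSpecific.any (fun k => PySem.Str.isIn k nl) := by
  rw [pv_contains_matched]
  simp [pvKeywordTags, pvDormSpecific]

-- the tag "acadmark" is matched exactly when an academic marker occurs
lemma pv_tag_acadmark (nl : String) :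
    PySem.Set.contains (pvMatchedB nl) "acadmark" =
      (["academic", "classroom", "lecture"] : List String).any
        (fun a => PySem.Str.isIn a nl) := by
  rw [pv_contains_matched]
  simp [pvKeywordTags]

-- endswith "hall" implies "hall" occurs as a substring
lemma pv_ends_isIn (nl : String) (h : PySem.Str.endswith nl "hall" = true) :
    PySem.Str.isIn "hall" nl = true := by
  rw [PySem.Str.isIn_iff_infix]
  have h' : PySem.Chars.endswith nl.toList "hall".toList = true := by simpa using h
  exact ((PySem.Chars.endswith_iff _ _).1 h').isInfix

-- if some dorm-specific keyword occurs and some keyword of the list occurs, A's dorm loop returns "dorm"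
lemma pv_inner_hit (nl : String) :
    ∀ kws : List String,
      pvDormSpecific.any (fun k => PySem.Str.isIn k nl) = true →
      (∃ k ∈ kws, PySem.Str.isIn k nl = true) →
      pvInnerA nl "dorm" kws = some "dorm"
  | [], _, h => by rcases h with ⟨k, hk, _⟩; cases hk
  | kw :: rest, hs, h => by
    by_cases hm : PySem.Str.isIn kw nl = true
    · simp only [pvInnerA, hm, hs, beq_self_eq_true, if_true]
    · have hm' : PySem.Str.isIn kw nl = false := by
        cases hx : PySem.Str.isIn kw nl <;> simp_all
      have htail : ∃ k ∈ rest, PySem.Str.isIn k nl = true := by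
        rcases h with ⟨k, hk, hkin⟩
        rcases List.mem_cons.1 hk with rfl | hk'
        · exact absurd hkin hm
        · exact ⟨k, hk', hkin⟩
      simp only [pvInnerA, hm', Bool.false_eq_true, if_false]
      exact pv_inner_hit nl rest hs htail

-- with no dorm-specific keyword present, only the keyword "hall" can make A's dorm loop return
lemma pv_inner_nospec (nl : String)
    (hs : pvDormSpecific.any (fun k => PySem.Str.isIn k nl) = false) :
    ∀ kws : List String,
      pvInnerA nl "dorm" kws =
        if kws.contains "hall" && PySem.Str.isIn "hall" nl &&
           !((["academic", "classroom", "lecture"] : List String).any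
               (fun a => PySem.Str.isIn a nl)) &&
           PySem.Str.endswith nl "hall"
        then some "dorm" else none
  | [] => by simp only [pvInnerA, List.contains_nil, Bool.false_and, Bool.false_eq_true, if_false]
  | kw :: rest => by
    have ih := pv_inner_nospec nl hs rest
    by_cases hkw : kw = "hall"
    · subst hkw
      have hcont : (("hall" :: rest).contains "hall") = true := by simp
      by_cases hm : PySem.Str.isIn "hall" nl = true
      · by_cases ha : (["academic", "classroom", "lecture"] : List String).any
            (fun a => PySem.Str.isIn a nl) = true
        · simp only [pvInnerA, hm, hs, ha, hcont, beq_self_eq_true, Bool.true_and, Bool.and_true,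
            Bool.not_true, Bool.and_false, Bool.false_and, Bool.false_eq_true, if_false,
            if_true, ih]
        · have ha' : (["academic", "classroom", "lecture"] : List String).any
              (fun a => PySem.Str.isIn a nl) = false := by
            cases hx : (["academic", "classroom", "lecture"] : List String).any
                (fun a => PySem.Str.isIn a nl) <;> simp_all
          by_cases he : PySem.Str.endswith nl "hall" = true
          · simp only [pvInnerA, hm, hs, ha', he, hcont, beq_self_eq_true, Bool.true_and,
              Bool.and_true, Bool.not_false, Bool.false_eq_true, if_false, if_true]
          · have he' : PySem.Str.endswith nl "hall" = false := by
              cases hx : PySem.Str.endswith nl "hall" <;> simp_all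
            simp only [pvInnerA, hm, hs, ha', he', hcont, beq_self_eq_true,
              Bool.and_true, Bool.not_false, Bool.and_false, Bool.false_eq_true, if_false,
              if_true, ih]
      · have hm' : PySem.Str.isIn "hall" nl = false := by
          cases hx : PySem.Str.isIn "hall" nl <;> simp_all
        simp only [pvInnerA, hm', Bool.false_eq_true, if_false, ih]
        congr 1
        simp only [Bool.and_false, Bool.false_and]
    · have hne : ("hall" == kw) = false := by
        simp only [beq_eq_false_iff_ne, ne_eq]; exact fun hx => hkw hx.symm
      have hne2 : (kw == "hall") = false := by
        simp only [beq_eq_false_iff_ne, ne_eq]; exact hkw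
      have hcont : ((kw :: rest).contains "hall") = rest.contains "hall" := by
        simp only [List.contains_cons, hne, Bool.false_or]
      by_cases hm : PySem.Str.isIn kw nl = true
      · simp only [pvInnerA, hm, hs, hne2, beq_self_eq_true, if_true,
          Bool.false_eq_true, if_false, Bool.false_and, ih, hcont]
      · have hm' : PySem.Str.isIn kw nl = false := by
          cases hx : PySem.Str.isIn kw nl <;> simp_all
        simp only [pvInnerA, hm', Bool.false_eq_true, if_false, ih, hcont]

-- for every non-dorm category the inner loop of A is a plain any-scan
lemma pv_inner_nondorm (nl : String) (cat : String) (hc : (cat == "dorm") = false) :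
    ∀ kws : List String,
      pvInnerA nl cat kws =
        if kws.any (fun kw => PySem.Str.isIn kw nl) then some cat else none
  | [] => by simp only [pvInnerA, List.any_nil, Bool.false_eq_true, if_false]
  | kw :: rest => by
    by_cases hm : PySem.Str.isIn kw nl = true
    · simp only [pvInnerA, hm, hc, List.any_cons, Bool.true_or, Bool.false_eq_true, if_false,
        if_true]
    · have hm' : PySem.Str.isIn kw nl = false := by
        cases hx : PySem.Str.isIn kw nl <;> simp_all
      simp only [pvInnerA, hm', Bool.false_eq_true, if_false, List.any_cons, Bool.false_or,
        pv_inner_nondorm nl cat hc rest]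

-- A's outer loop over a dorm-free rule list agrees with B's priority pick over its tags
lemma pv_outer_pick (nl : String) :
    ∀ l : List (String × List String),
      (∀ p ∈ l, (p.1 == "dorm") = false) →
      (∀ p ∈ l, PySem.Set.contains (pvMatchedB nl) p.1
                  = p.2.any (fun kw => PySem.Str.isIn kw nl)) →
      (pvOuterA nl l).getD "misc" = pvPickB (pvMatchedB nl) (l.map Prod.fst)
  | [], _, _ => by simp only [pvOuterA, pvPickB, List.map_nil, Option.getD_none]
  | (cat, kws) :: rest, h, hm => by
    have hc : (cat == "dorm") = false := h _ (List.mem_cons_self ..)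
    have hcm : PySem.Set.contains (pvMatchedB nl) cat
        = kws.any (fun kw => PySem.Str.isIn kw nl) := hm _ (List.mem_cons_self ..)
    rw [pvOuterA, pv_inner_nondorm nl cat hc kws]
    by_cases hany : kws.any (fun kw => PySem.Str.isIn kw nl) = true
    · simp only [List.map_cons, pvPickB, hcm, hany, if_true, Option.getD_some]
    · have hany' : kws.any (fun kw => PySem.Str.isIn kw nl) = false := by
        rwa [Bool.not_eq_true] at hany
      simp only [List.map_cons, pvPickB, hcm, hany', Bool.false_eq_true, if_false]
      exact pv_outer_pick nl rest (fun p hp => h p (List.mem_cons_of_mem _ hp))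
        (fun p hp => hm p (List.mem_cons_of_mem _ hp))

-- each of the five plain category tags is matched exactly when one of its keywords occurs
lemma pv_tags_plain (nl : String) :
    ∀ p ∈ pvCategoryRules.drop 1,
      PySem.Set.contains (pvMatchedB nl) p.1 = p.2.any (fun kw => PySem.Str.isIn kw nl) := by
  intro p hp
  fin_cases hp <;> · rw [pv_contains_matched]; simp [pvKeywordTags]

-- ===== VERDICT (by name: the statement is the Claim_ definition above) =====
theorem categorize_building_spec : Claim_equal_categorize_building := by
  intro name _
  unfold Spec_categorize_building categorize_building categorize_building_alt
  set nl := PySem.Str.lower name with hnl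
  have hrules : pvCategoryRules = ("dorm", pvDormKws) :: pvCategoryRules.drop 1 := rfl
  have hprio : pvPriorityB = (pvCategoryRules.drop 1).map Prod.fst := rfl
  have htail : (pvOuterA nl (pvCategoryRules.drop 1)).getD "misc"
      = pvPickB (pvMatchedB nl) pvPriorityB := by
    rw [hprio]
    exact pv_outer_pick nl _ (by decide) (pv_tags_plain nl)
  rw [hrules]
  simp only [pvOuterA]
  rw [pv_tag_dorm, pv_tag_acadmark]
  by_cases hs : pvDormSpecific.any (fun k => PySem.Str.isIn k nl) = true
  · have hhit : ∃ k ∈ pvDormKws, PySem.Str.isIn k nl = true := by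
      rcases List.any_eq_true.1 hs with ⟨k, hk, hkin⟩
      have hmem : ∀ x ∈ pvDormSpecific, x ∈ pvDormKws := by decide
      exact ⟨k, hmem k hk, hkin⟩
    rw [pv_inner_hit nl pvDormKws hs hhit, hs]
    simp only [if_true, Option.getD_some]
  · have hs' : pvDormSpecific.any (fun k => PySem.Str.isIn k nl) = false := by
      rwa [Bool.not_eq_true] at hs
    have hinner := pv_inner_nospec nl hs' pvDormKws
    have hcont : pvDormKws.contains "hall" = true := by decide
    rw [hcont] at hinner
    rw [hs']
    by_cases ha : (["academic", "classroom", "lecture"] : List String).any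
        (fun a => PySem.Str.isIn a nl) = true
    · rw [ha] at hinner
      simp only [Bool.not_true, Bool.and_false, Bool.false_and, Bool.false_eq_true, if_false]
        at hinner
      rw [hinner, ha]
      simp only [Bool.not_true, Bool.and_false, Bool.false_eq_true, if_false]
      exact htail
    · have ha' : (["academic", "classroom", "lecture"] : List String).any
          (fun a => PySem.Str.isIn a nl) = false := eq_false_of_ne_true ha
      rw [ha'] at hinner
      rw [ha']
      by_cases he : PySem.Str.endswith nl "hall" = true
      · rw [he, pv_ends_isIn nl he] at hinner
        simp only [Bool.and_true, Bool.not_false, if_true] at hinner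
        rw [hinner, he]
        simp only [Bool.not_false, Bool.and_true, if_true, Option.getD_some,
          Bool.false_eq_true, if_false]
      · have he' : PySem.Str.endswith nl "hall" = false := eq_false_of_ne_true he
        rw [he'] at hinner
        simp only [Bool.and_false, Bool.false_eq_true, if_false] at hinner
        rw [hinner, he']
        simp only [Bool.false_and, Bool.false_eq_true, if_false]
        exact htail
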